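-- pv_equiv track=rewrite | github.com/hamzahmed05/Algorithms | Algorithms/week7-DFS.py | is_cut_r
-- ===== SOURCE A (Python) =====
-- def is_cut_r(G, v, disc, marked, low, parent, AP, count):
--     marked[v] = True
--     children = 0
--     low[v] = count
--     disc[v] = count
--     count = count + 1
--
--     for d in G[v]:
--         if not marked[d]:
--             parent[d] = v
--             children += 1
--             count = is_cut_r(G, d, disc, marked, low, parent, AP, count)
--
--             low[v] = min(low[v], low[d])
--
--             if children > 1:
--                 AP[v] = True
--         elif d != parent[v]:
--             low[v] = min(low[v], disc[d])
--     return count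
-- ===== SOURCE B (Python) =====
-- def is_cut_r(G, v, disc, marked, low, parent, AP, count):
--     # Iterative DFS with an explicit stack of frames instead of recursion.
--     marked[v] = True
--     low[v] = count
--     disc[v] = count
--     count = count + 1
--     stack = [[v, G[v], 0, 0]]  # frame: vertex, adjacency list, next index, children
--     while stack:
--         u, adj, i, ch = stack[-1]
--         if i < len(adj):
--             d = adj[i]
--             stack[-1][2] = i + 1
--             if not marked[d]:
--                 parent[d] = u
--                 stack[-1][3] = ch + 1
--                 marked[d] = True
--                 low[d] = count
--                 disc[d] = count
--                 count = count + 1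
--                 stack.append([d, G[d], 0, 0])
--             elif d != parent[u]:
--                 low[u] = min(low[u], disc[d])
--         else:
--             stack.pop()
--             if stack:
--                 p = stack[-1][0]
--                 low[p] = min(low[p], low[u])
--                 if stack[-1][3] > 1:
--                     AP[p] = True
--     return count
-- ===== Notes on version B (the rewrite author's own statement) =====
-- stated objective: alternative
-- what changed: The recursive DFS is replaced by an iterative DFS over an explicit stack of frames (vertex, adjacency list, next index, children count), applying the child low-update and the children>1 AP marking at frame pop time; equal work, no Python recursion depth limit.
import Mathlib
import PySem

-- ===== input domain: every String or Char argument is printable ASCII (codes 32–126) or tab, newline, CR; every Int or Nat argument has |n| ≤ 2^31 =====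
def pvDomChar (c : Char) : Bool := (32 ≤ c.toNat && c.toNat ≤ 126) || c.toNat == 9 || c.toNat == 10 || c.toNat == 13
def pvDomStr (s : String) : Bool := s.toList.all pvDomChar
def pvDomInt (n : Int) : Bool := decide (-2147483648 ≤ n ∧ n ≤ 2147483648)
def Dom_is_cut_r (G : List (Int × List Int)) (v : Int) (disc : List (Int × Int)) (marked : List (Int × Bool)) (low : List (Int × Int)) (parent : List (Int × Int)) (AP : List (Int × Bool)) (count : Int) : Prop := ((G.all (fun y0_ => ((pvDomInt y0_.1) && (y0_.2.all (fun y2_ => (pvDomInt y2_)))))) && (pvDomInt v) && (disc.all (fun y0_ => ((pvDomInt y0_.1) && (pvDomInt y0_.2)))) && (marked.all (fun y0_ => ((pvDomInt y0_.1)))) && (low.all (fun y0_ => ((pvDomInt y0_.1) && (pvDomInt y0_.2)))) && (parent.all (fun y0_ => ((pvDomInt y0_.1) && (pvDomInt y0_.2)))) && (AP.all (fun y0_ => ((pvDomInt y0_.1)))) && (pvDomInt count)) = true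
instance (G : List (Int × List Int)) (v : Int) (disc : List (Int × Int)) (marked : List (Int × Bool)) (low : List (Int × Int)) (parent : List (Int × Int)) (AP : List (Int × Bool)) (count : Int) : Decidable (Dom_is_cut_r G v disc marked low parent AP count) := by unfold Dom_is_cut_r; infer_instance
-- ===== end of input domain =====

-- B replaces A's recursive DFS by an iterative DFS over an explicit frame stack (alternative, same cost);
-- both Pythons mutate disc/marked/low/parent/AP identically in place — the equivalence proved here is about the return value.

-- The mutable DFS state the Python threads along (the five dicts plus the counter); shared data type of both ports.
structure DfsSt where
  disc   : PySem.Dict Int Int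
  marked : PySem.Dict Int Bool
  low    : PySem.Dict Int Int
  parent : PySem.Dict Int Int
  AP     : PySem.Dict Int Bool
  count  : Int
deriving Repr, DecidableEq

-- G[u] (total form; Pre_ guarantees the key is present wherever the Python reads G).
def dfsAdj (G : List (Int × List Int)) (u : Int) : List Int := (PySem.Dict.mk G).getD u []

-- fuel for both ports: one unit per DFS call (A) / frame push (B); it is a totality guard only —
-- (total number of neighbour occurrences in G)+1 always suffices, since every call below the first
-- consumes one neighbour occurrence of a distinct visited vertex.
def dfsFuel (G : List (Int × List Int)) : Nat := (G.flatMap (fun p => p.2)).length + 1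

-- ===== PORT A =====
-- Literal port of A's body: the for-loop over G[v] with children accumulator; the recursive call
-- `count = is_cut_r(G, d, ...)` appears as the fuel-guarded inlined entry code (mark/low/disc/count)
-- followed by the loop over G[d]; the remaining fuel is threaded back so siblings continue with it.
def loopA (G : List (Int × List Int)) : (f : Nat) → Int → List Int → Int → DfsSt → Option (DfsSt × {f' : Nat // f' ≤ f})
  | f, _, [], _, S => some (S, ⟨f, Nat.le_refl f⟩)
  | f, v, d :: ns, ch, S =>
    if S.marked.getD d false = false then
      match f with
      | 0 => none
      | f + 1 =>
        let S1 : DfsSt := { S with parent := S.parent.insert d v }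
        let ch' := ch + 1
        let S2 : DfsSt := { S1 with marked := S1.marked.insert d true,
                                    low := S1.low.insert d S1.count,
                                    disc := S1.disc.insert d S1.count,
                                    count := S1.count + 1 }
        match loopA G f d (dfsAdj G d) 0 S2 with
        | none => none
        | some (S3, ⟨f2, h2⟩) =>
          let S4 : DfsSt := { S3 with low := S3.low.insert v (min (S3.low.getD v 0) (S3.low.getD d 0)) }
          let S5 : DfsSt := if ch' > 1 then { S4 with AP := S4.AP.insert v true } else S4
          match loopA G f2 v ns ch' S5 with
          | none => none
          | some (S6, ⟨f3, h3⟩) => some (S6, ⟨f3, by omega⟩)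
    else
      if d ≠ S.parent.getD v 0 then
        loopA G f v ns ch { S with low := S.low.insert v (min (S.low.getD v 0) (S.disc.getD d 0)) }
      else
        loopA G f v ns ch S
termination_by f _ ns _ _ => (f, ns.length)
decreasing_by all_goals (simp_wf; omega)

def is_cut_r (G : List (Int × List Int)) (v : Int) (disc : List (Int × Int)) (marked : List (Int × Bool)) (low : List (Int × Int)) (parent : List (Int × Int)) (AP : List (Int × Bool)) (count : Int) : Int :=
  let S0 : DfsSt := ⟨PySem.Dict.mk disc, PySem.Dict.mk marked, PySem.Dict.mk low, PySem.Dict.mk parent, PySem.Dict.mk AP, count⟩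
  -- marked[v] = True; children = 0; low[v] = count; disc[v] = count; count = count + 1
  let S1 : DfsSt := { S0 with marked := S0.marked.insert v true,
                              low := S0.low.insert v count,
                              disc := S0.disc.insert v count,
                              count := count + 1 }
  match loopA G (dfsFuel G) v (dfsAdj G v) 0 S1 with
  | none => 0                -- fuel exhaustion: unreachable at dfsFuel
  | some (S', _) => S'.count

-- ===== PORT B =====
-- Port of Source B: an explicit stack of frames (vertex, remaining adjacency suffix, children count);
-- advancing the index i into adj is ported as peeling the head of the remaining suffix.
-- Source B's pop-branch body (apply low/AP updates to the parent frame below, if any):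
def popApply (u : Int) (st : List (Int × List Int × Int)) (S : DfsSt) : DfsSt :=
  match st with
  | [] => S
  | (p, _, chp) :: _ =>
    let S1 : DfsSt := { S with low := S.low.insert p (min (S.low.getD p 0) (S.low.getD u 0)) }
    if chp > 1 then { S1 with AP := S1.AP.insert p true } else S1

def stackNs (st : List (Int × List Int × Int)) : Nat := (st.map (fun fr => fr.2.1.length + 1)).sum

def runB (G : List (Int × List Int)) : (f : Nat) → List (Int × List Int × Int) → DfsSt → Option DfsSt
  | _, [], S => some S
  | f, (u, [], _) :: st, S => runB G f st (popApply u st S)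
  | f, (u, d :: ns, ch) :: st, S =>
    if S.marked.getD d false = false then
      match f with
      | 0 => none
      | f + 1 =>
        let S1 : DfsSt := { S with parent := S.parent.insert d u }
        let S2 : DfsSt := { S1 with marked := S1.marked.insert d true,
                                    low := S1.low.insert d S1.count,
                                    disc := S1.disc.insert d S1.count,
                                    count := S1.count + 1 }
        runB G f ((d, dfsAdj G d, 0) :: (u, ns, ch + 1) :: st) S2
    else
      if d ≠ S.parent.getD u 0 then
        runB G f ((u, ns, ch) :: st) { S with low := S.low.insert u (min (S.low.getD u 0) (S.disc.getD d 0)) }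
      else
        runB G f ((u, ns, ch) :: st) S
termination_by f st _ => (f, stackNs st)
decreasing_by all_goals (simp_wf; simp [stackNs]; omega)

def is_cut_r_alt (G : List (Int × List Int)) (v : Int) (disc : List (Int × Int)) (marked : List (Int × Bool)) (low : List (Int × Int)) (parent : List (Int × Int)) (AP : List (Int × Bool)) (count : Int) : Int :=
  let S0 : DfsSt := ⟨PySem.Dict.mk disc, PySem.Dict.mk marked, PySem.Dict.mk low, PySem.Dict.mk parent, PySem.Dict.mk AP, count⟩
  let S1 : DfsSt := { S0 with marked := S0.marked.insert v true,
                              low := S0.low.insert v count,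
                              disc := S0.disc.insert v count,
                              count := count + 1 }
  match runB G (dfsFuel G) [(v, dfsAdj G v, 0)] S1 with
  | none => 0                -- fuel exhaustion: unreachable at dfsFuel
  | some S' => S'.count

-- ===== PRECONDITION & SPEC =====
-- The vertices the DFS visits: v together with everything reachable from it through chains of
-- initially-unmarked vertices (plain graph reachability; G.length+1 rounds reach the fixpoint).
def dfsVisited (G : List (Int × List Int)) (marked : List (Int × Bool)) (v : Int) : List Int :=
  (List.range (G.length + 1)).foldl
    (fun R _ =>
      PySem.Set.update R
        ((G.filter (fun p => decide (p.1 ∈ R) &&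
            (p.1 == v || !((PySem.Dict.mk marked).getD p.1 false)))).flatMap (fun p => p.2)))
    (PySem.Set.ofList [v])

-- Reachability through initially-unmarked vertices other than v, from the given start vertices:
-- what the DFS has visited once the root has finished its subtrees rooted at `starts`.
def dfsReachFrom (G : List (Int × List Int)) (marked : List (Int × Bool)) (v : Int) (starts : List Int) : List Int :=
  (List.range (G.length + 1)).foldl
    (fun R _ =>
      PySem.Set.update R
        ((G.filter (fun p => decide (p.1 ∈ R) && !(p.1 == v) &&
            !((PySem.Dict.mk marked).getD p.1 false))).flatMap (fun p => p.2)))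
    (PySem.Set.ofList (starts.filter (fun d => !((PySem.Dict.mk marked).getD d false))))

-- Does the root frame ever take the elif branch (i.e. read parent[v])?  Its j-th neighbour is seen
-- marked exactly when it is v, initially marked, or already visited via the earlier neighbours.
def rootElifFires (G : List (Int × List Int)) (marked : List (Int × Bool)) (v : Int) : Bool :=
  let adjv := (PySem.Dict.mk G).getD v []
  (List.range adjv.length).any (fun j =>
    let d := adjv.getD j 0
    d == v || (PySem.Dict.mk marked).getD d false ||
      decide (d ∈ dfsReachFrom G marked v (adjv.take j)))

-- Pre_ excludes the KeyError inputs: v (or a visited vertex) missing from G, a neighbour of a visited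
-- vertex missing from marked (allowed when it is v or the vertex itself: A writes marked[u]=True on
-- entry before any read of it), v missing from parent when the root's elif fires, or an already-marked
-- neighbour d of a visited vertex missing from disc (not needed when d is v — disc[v] is written at
-- entry — or when d is examined only by the root with parent[v] = d, where the elif guard skips the read).
def Pre_is_cut_r (G : List (Int × List Int)) (v : Int) (disc : List (Int × Int)) (marked : List (Int × Bool)) (low : List (Int × Int)) (parent : List (Int × Int)) (AP : List (Int × Bool)) (count : Int) : Prop :=
  (PySem.Dict.mk G).contains v = true ∧
  (rootElifFires G marked v = true → (PySem.Dict.mk parent).contains v = true) ∧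
  ∀ u ∈ dfsVisited G marked v, (u = v ∨ (PySem.Dict.mk marked).getD u false = false) →
    (PySem.Dict.mk G).contains u = true ∧
    ∀ d ∈ (PySem.Dict.mk G).getD u [],
      (d = u ∨ d = v ∨ (PySem.Dict.mk marked).contains d = true) ∧
      ((PySem.Dict.mk marked).getD d false = true →
        d = v ∨ (PySem.Dict.mk disc).contains d = true ∨
          (u = v ∧ (PySem.Dict.mk parent).get? v = some d))
instance (G : List (Int × List Int)) (v : Int) (disc : List (Int × Int)) (marked : List (Int × Bool)) (low : List (Int × Int)) (parent : List (Int × Int)) (AP : List (Int × Bool)) (count : Int) : Decidable (Pre_is_cut_r G v disc marked low parent AP count) := by unfold Pre_is_cut_r; infer_instance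

def pvWitness_is_cut_r : (List (Int × List Int)) × Int × (List (Int × Int)) × (List (Int × Bool)) × (List (Int × Int)) × (List (Int × Int)) × (List (Int × Bool)) × Int :=
  ([(0, [1, 2]), (1, [0, 2]), (2, [0, 1])], 0, [], [(0, false), (1, false), (2, false)], [], [(0, 0)], [], 0)

def Spec_is_cut_r (G : List (Int × List Int)) (v : Int) (disc : List (Int × Int)) (marked : List (Int × Bool)) (low : List (Int × Int)) (parent : List (Int × Int)) (AP : List (Int × Bool)) (count : Int) (out : Int) : Prop := out = is_cut_r_alt G v disc marked low parent AP count
instance (G : List (Int × List Int)) (v : Int) (disc : List (Int × Int)) (marked : List (Int × Bool)) (low : List (Int × Int)) (parent : List (Int × Int)) (AP : List (Int × Bool)) (count : Int) (out : Int) : Decidable (Spec_is_cut_r G v disc marked low parent AP count out) := by unfold Spec_is_cut_r; infer_instance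

-- ===== CLAIM (what is proved, stated in full; the proofs are below) =====
def Claim_equal_is_cut_r : Prop := ∀ (G : List (Int × List Int)) (v : Int) (disc : List (Int × Int)) (marked : List (Int × Bool)) (low : List (Int × Int)) (parent : List (Int × Int)) (AP : List (Int × Bool)) (count : Int), Dom_is_cut_r G v disc marked low parent AP count → Pre_is_cut_r G v disc marked low parent AP count → Spec_is_cut_r G v disc marked low parent AP count (is_cut_r G v disc marked low parent AP count)

-- ===== LEMMAS AND PROOFS =====

-- Simulation: running the stack machine with a frame (v, ns, ch) on top is A's loop over ns for v,
-- followed (with the fuel the loop left) by Source B's pop step and the rest of the stack.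
theorem runB_frame (G : List (Int × List Int)) (f : Nat) (v : Int) (ns : List Int) (ch : Int) (st : List (Int × List Int × Int)) (S : DfsSt) :
    runB G f ((v, ns, ch) :: st) S =
      match loopA G f v ns ch S with
      | none => none
      | some (S', f') => runB G f'.1 st (popApply v st S') := by
  induction f using Nat.strong_induction_on generalizing v ns ch st S with
  | _ f IHf =>
    induction ns generalizing ch S with
    | nil => simp [runB, loopA]
    | cons d ns ih =>
      by_cases hm : S.marked.getD d false = false
      · cases f with
        | zero => simp [runB, loopA, hm]
        | succ f =>
          rw [runB, loopA]
          simp only [hm, if_pos]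
          rw [IHf f (Nat.lt_succ_self f)]
          cases hc : loopA G f d (dfsAdj G d) 0 _ with
          | none => rfl
          | some p =>
            rcases p with ⟨S3, ⟨f2, h2⟩⟩
            dsimp only
            rw [IHf f2 (by omega)]
            dsimp only [popApply]
            cases hc2 : loopA G f2 v ns (ch + 1) _ with
            | none => rfl
            | some q => rcases q with ⟨S6, ⟨f3, h3⟩⟩; rfl
      · rw [runB.eq_def, loopA.eq_def]
        dsimp only
        rw [if_neg hm, if_neg hm]
        by_cases hp : d ≠ S.parent.getD v 0
        · rw [if_pos hp, if_pos hp, ih]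
        · rw [if_neg hp, if_neg hp, ih]

-- the shared entry epilogue: the stack machine started on one frame is A's loop on that frame.
theorem entry_eq (G : List (Int × List Int)) (F : Nat) (v : Int) (a : List Int) (S1 : DfsSt) :
    (match runB G F [(v, a, 0)] S1 with | none => (0 : Int) | some S' => S'.count) =
      (match loopA G F v a 0 S1 with | none => (0 : Int) | some (S', _) => S'.count) := by
  rw [runB_frame]
  cases h : loopA G F v a 0 S1 with
  | none => rfl
  | some p => rcases p with ⟨S', f'⟩; simp [runB, popApply]

theorem is_cut_r_spec : Claim_equal_is_cut_r := by
  intro G v disc marked low parent AP count _ _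
  unfold Spec_is_cut_r is_cut_r is_cut_r_alt
  simp only [entry_eq]
  split <;> split <;> simp_all
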